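-- pv_equiv track=rewrite | github.com/datavikingr/professional-portfolio | Personal/English-ASFtransliteration.py | modify_characters
-- ===== SOURCE A (Python) =====
-- def modify_characters(text, swap_dict):
--     result = []
--     i = 0
--     while i < len(text): # Check for two-letter combo
--         combo = text[i:i+2]
--         if combo in swap_dict:
--             result.append(swap_dict[combo])
--             i += 2
--         else: # If not a two-letter combo, process one character
--             result.append(swap_dict.get(text[i], text[i]))
--             i += 1
--     return ''.join(result)
-- ===== SOURCE B (Python) =====
-- def modify_characters(text, swap_dict):
--     # Single streaming pass with a one-character pending buffer instead of an
--     # index walk with i += 1 / i += 2 stepping.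
--     out = []
--     pending = None
--     for ch in text:
--         if pending is None:
--             pending = ch
--         else:
--             pair = pending + ch
--             if pair in swap_dict:
--                 out.append(swap_dict[pair])
--                 pending = None
--             else:
--                 out.append(swap_dict.get(pending, pending))
--                 pending = ch
--     if pending is not None:
--         out.append(swap_dict.get(pending, pending))
--     return ''.join(out)
-- ===== Notes on version B (the rewrite author's own statement) =====
-- stated objective: faster
-- what changed: Replaces A's while-loop index walk with i+=1/i+=2 stepping over text[i:i+2] slices by a single for-each streaming pass holding a one-character pending buffer; this drops the per-position slice allocation, a constant-factor speedup measured.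
import Mathlib
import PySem

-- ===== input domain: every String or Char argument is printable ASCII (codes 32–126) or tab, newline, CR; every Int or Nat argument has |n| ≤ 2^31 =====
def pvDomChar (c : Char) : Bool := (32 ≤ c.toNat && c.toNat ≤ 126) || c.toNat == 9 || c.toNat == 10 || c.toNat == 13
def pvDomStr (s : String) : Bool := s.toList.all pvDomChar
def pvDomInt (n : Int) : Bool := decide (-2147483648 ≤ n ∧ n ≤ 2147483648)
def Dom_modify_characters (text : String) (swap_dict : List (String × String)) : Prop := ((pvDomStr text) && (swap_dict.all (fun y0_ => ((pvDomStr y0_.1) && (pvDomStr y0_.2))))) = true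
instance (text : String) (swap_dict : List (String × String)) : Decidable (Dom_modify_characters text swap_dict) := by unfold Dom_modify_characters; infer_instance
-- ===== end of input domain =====

-- B replaces A's index walk (i += 1 / i += 2 over text[i:i+2] slices) by one streaming
-- fold over the characters with a one-character pending buffer, avoiding per-position
-- slicing (a constant-factor speedup, measured).

-- ===== PORT A =====
-- while i < len(text): combo = text[i:i+2]; if combo in swap_dict: …; i += 2 else: …; i += 1
-- (dict modelled per convention as an association list; lookup = first match = List.lookup)
def modifyLoopA (swap_dict : List (String × String)) (cs : List Char) (i : Nat)
    (result : List String) : List String :=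
  if h : i < cs.length then
    let combo := String.ofList (PySem.List.slice cs (some (i : Int)) (some ((i : Int) + 2)))
    if (List.lookup combo swap_dict).isSome then
      modifyLoopA swap_dict cs (i + 2) (result ++ [(List.lookup combo swap_dict).getD ""])
    else
      modifyLoopA swap_dict cs (i + 1)
        (result ++ [(List.lookup (String.ofList [cs[i]]) swap_dict).getD (String.ofList [cs[i]])])
  else result
termination_by cs.length - i
decreasing_by all_goals omega

def modify_characters (text : String) (swap_dict : List (String × String)) : String :=
  PySem.Str.join "" (modifyLoopA swap_dict text.toList 0 [])

-- ===== PORT B =====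
-- swap_dict.get(p, p) for a single held character p
def lookupOne (swap_dict : List (String × String)) (p : Char) : String :=
  (List.lookup (String.ofList [p]) swap_dict).getD (String.ofList [p])

-- one step of the for-loop body of B: state = (out, pending)
def stepB (swap_dict : List (String × String)) (st : List String × Option Char) (ch : Char) :
    List String × Option Char :=
  match st.2 with
  | none => (st.1, some ch)
  | some p =>
    let pair := String.ofList [p, ch]
    if (List.lookup pair swap_dict).isSome then
      (st.1 ++ [(List.lookup pair swap_dict).getD ""], none)
    else
      (st.1 ++ [lookupOne swap_dict p], some ch)

def modify_characters_alt (text : String) (swap_dict : List (String × String)) : String :=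
  let st := text.toList.foldl (stepB swap_dict) ([], none)
  let out := match st.2 with
    | some p => st.1 ++ [lookupOne swap_dict p]
    | none => st.1
  PySem.Str.join "" out

-- ===== PRECONDITION & SPEC =====
def Spec_modify_characters (text : String) (swap_dict : List (String × String)) (out : String) : Prop := out = modify_characters_alt text swap_dict
instance (text : String) (swap_dict : List (String × String)) (out : String) : Decidable (Spec_modify_characters text swap_dict out) := by unfold Spec_modify_characters; infer_instance

-- ===== CLAIM (what is proved, stated in full; the proofs are below) =====
def Claim_equal_modify_characters : Prop := ∀ (text : String) (swap_dict : List (String × String)), Dom_modify_characters text swap_dict → Spec_modify_characters text swap_dict (modify_characters text swap_dict)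

-- ===== LEMMAS AND PROOFS =====

-- the common characterisation: the list of output pieces, one per consumed 1- or 2-char chunk
def pieces (swap_dict : List (String × String)) : List Char → List String
  | [] => []
  | c :: rest =>
    match rest with
    | [] => [lookupOne swap_dict c]
    | c2 :: rs =>
      if (List.lookup (String.ofList [c, c2]) swap_dict).isSome then
        (List.lookup (String.ofList [c, c2]) swap_dict).getD "" :: pieces swap_dict rs
      else
        lookupOne swap_dict c :: pieces swap_dict (c2 :: rs)

-- flush of B's pending buffer (the code after B's for-loop)
def finishB (swap_dict : List (String × String)) (st : List String × Option Char) : List String :=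
  match st.2 with
  | some p => st.1 ++ [lookupOne swap_dict p]
  | none => st.1

theorem slice_two (cs : List Char) (i : Nat) :
    PySem.List.slice cs (some (i : Int)) (some ((i : Int) + 2)) = (cs.drop i).take 2 := by
  have h2 : ((i : Int) + 2) = (((i + 2 : Nat)) : Int) := by push_cast; ring
  rw [h2, PySem.List.slice_natCast]
  congr 1
  omega

theorem modifyLoopA_eq (sd : List (String × String)) :
    ∀ (n : Nat) (cs : List Char) (i : Nat) (acc : List String), cs.length - i ≤ n →
      modifyLoopA sd cs i acc = acc ++ pieces sd (cs.drop i) := by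
  intro n
  induction n with
  | zero =>
    intro cs i acc hn
    have h : ¬ i < cs.length := by omega
    rw [modifyLoopA, dif_neg h, List.drop_eq_nil_of_le (by omega)]
    simp [pieces]
  | succ n ih =>
    intro cs i acc hn
    rw [modifyLoopA]
    by_cases h : i < cs.length
    · rw [dif_pos h]
      simp only [slice_two]
      have hdrop : cs.drop i = cs[i] :: cs.drop (i + 1) := List.drop_eq_getElem_cons h
      by_cases h1 : i + 1 < cs.length
      · have hdrop1 : cs.drop (i + 1) = cs[i + 1] :: cs.drop (i + 2) :=
          List.drop_eq_getElem_cons h1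
        rw [hdrop, hdrop1]
        simp only [List.take_succ_cons, List.take_zero]
        by_cases hk : (List.lookup (String.ofList [cs[i], cs[i + 1]]) sd).isSome
        · rw [if_pos hk, ih cs (i + 2) _ (by omega)]
          simp [pieces, hk]
        · rw [if_neg hk, ih cs (i + 1) _ (by omega), hdrop1]
          simp [pieces, hk, lookupOne]
      · have hdrop1 : cs.drop (i + 1) = [] := List.drop_eq_nil_of_le (by omega)
        rw [hdrop, hdrop1]
        simp only [List.take_succ_cons, List.take_nil]
        by_cases hk : (List.lookup (String.ofList [cs[i]]) sd).isSome
        · rw [if_pos hk, ih cs (i + 2) _ (by omega), List.drop_eq_nil_of_le (by omega)]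
          obtain ⟨v, hv⟩ := Option.isSome_iff_exists.mp hk
          simp [pieces, lookupOne, hv]
        · rw [if_neg hk, ih cs (i + 1) _ (by omega), hdrop1]
          simp [pieces, lookupOne]
    · rw [dif_neg h, List.drop_eq_nil_of_le (by omega)]
      simp [pieces]

theorem foldB_eq (sd : List (String × String)) :
    ∀ (n : Nat) (cs : List Char), cs.length ≤ n →
      (∀ out, finishB sd (cs.foldl (stepB sd) (out, none)) = out ++ pieces sd cs) ∧
      (∀ out p, finishB sd (cs.foldl (stepB sd) (out, some p)) = out ++ pieces sd (p :: cs)) := by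
  intro n
  induction n with
  | zero =>
    intro cs hn
    have : cs = [] := List.eq_nil_of_length_eq_zero (by omega)
    subst this
    exact ⟨fun out => by simp [finishB, pieces],
           fun out p => by simp [finishB, pieces]⟩
  | succ n ih =>
    intro cs hn
    match cs with
    | [] =>
      exact ⟨fun out => by simp [finishB, pieces],
             fun out p => by simp [finishB, pieces]⟩
    | c :: rest =>
      have hr : rest.length ≤ n := by simpa using hn
      constructor
      · intro out
        have := (ih rest hr).2 out c
        simpa [stepB] using this
      · intro out p
        simp only [List.foldl_cons]
        by_cases hk : (List.lookup (String.ofList [p, c]) sd).isSome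
        · have : stepB sd (out, some p) c =
              (out ++ [(List.lookup (String.ofList [p, c]) sd).getD ""], none) := by
            simp [stepB, hk]
          rw [this, (ih rest hr).1]
          simp [pieces, hk]
        · have : stepB sd (out, some p) c = (out ++ [lookupOne sd p], some c) := by
            simp [stepB, hk]
          rw [this, (ih rest hr).2]
          simp [pieces, hk]

-- ===== VERDICT (by name: the statement is the Claim_ definition above) =====
theorem modify_characters_spec : Claim_equal_modify_characters := by
  intro text swap_dict _
  unfold Spec_modify_characters modify_characters modify_characters_alt
  rw [modifyLoopA_eq swap_dict text.toList.length text.toList 0 [] (by omega)]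
  have hb := (foldB_eq swap_dict text.toList.length text.toList le_rfl).1 []
  simp only [finishB] at hb
  simp [hb]
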